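-- pv_equiv track=rewrite | github.com/ehrakis/Advent-of-code | 2025/day_9/part_2.py | is_rectangle_inside_polygon
-- ===== SOURCE A (Python) =====
-- def get_rectangle_perimeter_points(corner_1, corner_2):
--     top_left = (
--         corner_1[0] if corner_1[0] < corner_2[0] else corner_2[0],
--         corner_1[1] if corner_1[1] < corner_2[1] else corner_2[1],
--     )
--     bottom_right = (
--         corner_1[0] if corner_1[0] > corner_2[0] else corner_2[0],
--         corner_1[1] if corner_1[1] > corner_2[1] else corner_2[1],
--     )
--
--     points = []
--     for x in range(top_left[0], bottom_right[0] + 1):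
--         points.append((x, top_left[1]))
--
--     for y in range(top_left[1] + 1, bottom_right[1] + 1):
--         points.append((bottom_right[0], y))
--
--     if top_left[1] != bottom_right[1]:
--         for x in range(bottom_right[0] - 1, top_left[0] + 1, -1):
--             points.append((x, bottom_right[1]))
--
--     if top_left[0] != bottom_right[0]:
--         for y in range(bottom_right[1], top_left[1], -1):
--             points.append((top_left[0], y))
--
--     return points
--
-- def is_rectangle_inside_polygon(
--     outbout_coordinates,
--     corner_1,
--     corner_2,
-- ):
--     perimeter = get_rectangle_perimeter_points(corner_1, corner_2)
--
--     for point in perimeter: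
--         if point in outbout_coordinates:
--             return False
--     return True
-- ===== SOURCE B (Python) =====
-- def is_rectangle_inside_polygon(outbout_coordinates, corner_1, corner_2):
--     lx, hx = sorted((corner_1[0], corner_2[0]))
--     ly, hy = sorted((corner_1[1], corner_2[1]))
--     return all(not (lx <= x <= hx and ly <= y <= hy and
--                     (x == lx or x == hx or y == ly or y == hy))
--                for x, y in outbout_coordinates)
-- ===== Notes on version B (the rewrite author's own statement) =====
-- stated objective: faster
-- what changed: Instead of materialising every perimeter point and scanning the obstacle list for each one, B iterates the obstacles once and tests each with an O(1) rectangle-boundary predicate.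
-- intended difference: On rectangles at least 2 wide and at least 1 tall where the only obstacle(s) on the boundary sit at the point (min_x+1, max_y) — the one boundary point A's off-by-one range(hx-1, lx+1, -1) never visits — A returns True while B returns the intended False. — e.g. on is_rectangle_inside_polygon([(1, 2)], (0, 0), (2, 2)): A returns true, B returns false
import Mathlib
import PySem

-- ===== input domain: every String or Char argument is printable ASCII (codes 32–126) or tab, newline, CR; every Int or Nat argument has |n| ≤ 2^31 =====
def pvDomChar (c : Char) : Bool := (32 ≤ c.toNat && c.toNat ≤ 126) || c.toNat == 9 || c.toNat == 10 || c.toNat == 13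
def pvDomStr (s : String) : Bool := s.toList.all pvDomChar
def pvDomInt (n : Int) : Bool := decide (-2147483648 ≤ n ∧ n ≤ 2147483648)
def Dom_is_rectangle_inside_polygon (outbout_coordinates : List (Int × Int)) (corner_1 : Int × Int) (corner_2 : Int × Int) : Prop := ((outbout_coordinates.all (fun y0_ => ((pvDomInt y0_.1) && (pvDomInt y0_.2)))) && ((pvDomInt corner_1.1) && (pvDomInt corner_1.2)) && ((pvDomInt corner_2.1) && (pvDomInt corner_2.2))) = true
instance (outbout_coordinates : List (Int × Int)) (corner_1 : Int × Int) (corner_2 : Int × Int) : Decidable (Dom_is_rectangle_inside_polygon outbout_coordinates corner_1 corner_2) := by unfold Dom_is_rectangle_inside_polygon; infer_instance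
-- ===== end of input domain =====

-- B replaces A's "enumerate every perimeter point and scan the obstacle list for each"
-- with one pass over the obstacles and an O(1) rectangle-boundary test per obstacle;
-- on the corner described at D_ below, B fixes A's off-by-one.

-- ===== PORT A =====
def get_rectangle_perimeter_points (corner_1 : Int × Int) (corner_2 : Int × Int) : List (Int × Int) :=
  let top_left : Int × Int :=
    (if corner_1.1 < corner_2.1 then corner_1.1 else corner_2.1,
     if corner_1.2 < corner_2.2 then corner_1.2 else corner_2.2)
  let bottom_right : Int × Int :=
    (if corner_1.1 > corner_2.1 then corner_1.1 else corner_2.1,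
     if corner_1.2 > corner_2.2 then corner_1.2 else corner_2.2)
  let pts1 := (PySem.List.pyRange top_left.1 (bottom_right.1 + 1) 1).map (fun x => (x, top_left.2))
  let pts2 := (PySem.List.pyRange (top_left.2 + 1) (bottom_right.2 + 1) 1).map (fun y => (bottom_right.1, y))
  let pts3 := if top_left.2 ≠ bottom_right.2 then
      (PySem.List.pyRange (bottom_right.1 - 1) (top_left.1 + 1) (-1)).map (fun x => (x, bottom_right.2))
    else []
  let pts4 := if top_left.1 ≠ bottom_right.1 then
      (PySem.List.pyRange bottom_right.2 top_left.2 (-1)).map (fun y => (top_left.1, y))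
    else []
  pts1 ++ pts2 ++ pts3 ++ pts4

-- A's loop: for point in perimeter: if point in outbout_coordinates: return False; return True
def pvLoopA (outbout_coordinates : List (Int × Int)) : List (Int × Int) → Bool
  | [] => true
  | p :: rest => if p ∈ outbout_coordinates then false else pvLoopA outbout_coordinates rest

def is_rectangle_inside_polygon (outbout_coordinates : List (Int × Int)) (corner_1 : Int × Int) (corner_2 : Int × Int) : Bool :=
  pvLoopA outbout_coordinates (get_rectangle_perimeter_points corner_1 corner_2)

-- ===== PORT B =====
def is_rectangle_inside_polygon_alt (outbout_coordinates : List (Int × Int)) (corner_1 : Int × Int) (corner_2 : Int × Int) : Bool :=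
  let lx := min corner_1.1 corner_2.1
  let hx := max corner_1.1 corner_2.1
  let ly := min corner_1.2 corner_2.2
  let hy := max corner_1.2 corner_2.2
  outbout_coordinates.all fun p =>
    !(decide (lx ≤ p.1 ∧ p.1 ≤ hx ∧ ly ≤ p.2 ∧ p.2 ≤ hy ∧
      (p.1 = lx ∨ p.1 = hx ∨ p.2 = ly ∨ p.2 = hy)))

-- ===== PRECONDITION & SPEC =====
-- When the rectangle is at least 2 wide and at least 1 tall and the obstacles contain the
-- boundary point (min_x+1, max_y), A's off-by-one range(hx-1, lx+1, -1) skips that point, so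
-- A wrongly returns True whenever it is the only boundary obstacle, while B returns the
-- intended False there.
def D_is_rectangle_inside_polygon (outbout_coordinates : List (Int × Int)) (corner_1 : Int × Int) (corner_2 : Int × Int) : Prop :=
  let lx := min corner_1.1 corner_2.1
  let hx := max corner_1.1 corner_2.1
  let ly := min corner_1.2 corner_2.2
  let hy := max corner_1.2 corner_2.2
  lx + 2 ≤ hx ∧ ly + 1 ≤ hy ∧ (lx + 1, hy) ∈ outbout_coordinates ∧
  ∀ p ∈ outbout_coordinates,
    max (max (lx - p.1) (p.1 - hx)) (max (ly - p.2) (p.2 - hy)) = 0 → p = (lx + 1, hy)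
instance (outbout_coordinates : List (Int × Int)) (corner_1 : Int × Int) (corner_2 : Int × Int) : Decidable (D_is_rectangle_inside_polygon outbout_coordinates corner_1 corner_2) := by unfold D_is_rectangle_inside_polygon; infer_instance

def Spec_is_rectangle_inside_polygon (outbout_coordinates : List (Int × Int)) (corner_1 : Int × Int) (corner_2 : Int × Int) (out : Bool) : Prop := ¬ D_is_rectangle_inside_polygon outbout_coordinates corner_1 corner_2 → out = is_rectangle_inside_polygon_alt outbout_coordinates corner_1 corner_2
instance (outbout_coordinates : List (Int × Int)) (corner_1 : Int × Int) (corner_2 : Int × Int) (out : Bool) : Decidable (Spec_is_rectangle_inside_polygon outbout_coordinates corner_1 corner_2 out) := by unfold Spec_is_rectangle_inside_polygon; infer_instance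

def pvDiffWitness_is_rectangle_inside_polygon : (List (Int × Int)) × (Int × Int) × (Int × Int) := ([(1, 2)], (0, 0), (2, 2))
def pvDiffWitnessOut_is_rectangle_inside_polygon : Bool × Bool := (true, false)

-- ===== CLAIM (what is proved, stated in full; the proofs are below) =====
def Claim_unchanged_is_rectangle_inside_polygon : Prop := ∀ (outbout_coordinates : List (Int × Int)) (corner_1 : Int × Int) (corner_2 : Int × Int), Dom_is_rectangle_inside_polygon outbout_coordinates corner_1 corner_2 → Spec_is_rectangle_inside_polygon outbout_coordinates corner_1 corner_2 (is_rectangle_inside_polygon outbout_coordinates corner_1 corner_2)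
def Claim_changed_is_rectangle_inside_polygon : Prop := Dom_is_rectangle_inside_polygon (pvDiffWitness_is_rectangle_inside_polygon.1) (pvDiffWitness_is_rectangle_inside_polygon.2.1) (pvDiffWitness_is_rectangle_inside_polygon.2.2) ∧ D_is_rectangle_inside_polygon (pvDiffWitness_is_rectangle_inside_polygon.1) (pvDiffWitness_is_rectangle_inside_polygon.2.1) (pvDiffWitness_is_rectangle_inside_polygon.2.2) ∧ is_rectangle_inside_polygon (pvDiffWitness_is_rectangle_inside_polygon.1) (pvDiffWitness_is_rectangle_inside_polygon.2.1) (pvDiffWitness_is_rectangle_inside_polygon.2.2) = pvDiffWitnessOut_is_rectangle_inside_polygon.1 ∧ is_rectangle_inside_polygon_alt (pvDiffWitness_is_rectangle_inside_polygon.1) (pvDiffWitness_is_rectangle_inside_polygon.2.1) (pvDiffWitness_is_rectangle_inside_polygon.2.2) = pvDiffWitnessOut_is_rectangle_inside_polygon.2 ∧ pvDiffWitnessOut_is_rectangle_inside_polygon.1 ≠ pvDiffWitnessOut_is_rectangle_inside_polygon.2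

def Claim_exact_is_rectangle_inside_polygon : Prop := ∀ (outbout_coordinates : List (Int × Int)) (corner_1 : Int × Int) (corner_2 : Int × Int), Dom_is_rectangle_inside_polygon outbout_coordinates corner_1 corner_2 → D_is_rectangle_inside_polygon outbout_coordinates corner_1 corner_2 → is_rectangle_inside_polygon outbout_coordinates corner_1 corner_2 ≠ is_rectangle_inside_polygon_alt outbout_coordinates corner_1 corner_2

-- ===== LEMMAS AND PROOFS =====

lemma pvLoopA_eq_true_iff (obs l : List (Int × Int)) :
    pvLoopA obs l = true ↔ ∀ p ∈ l, p ∉ obs := by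
  induction l with
  | nil => simp [pvLoopA]
  | cons p rest ih => by_cases h : p ∈ obs <;> simp [pvLoopA, h, ih]

lemma alt_eq_true_iff (obs : List (Int × Int)) (c1 c2 : Int × Int) :
    is_rectangle_inside_polygon_alt obs c1 c2 = true ↔
      ∀ p ∈ obs, ¬ (min c1.1 c2.1 ≤ p.1 ∧ p.1 ≤ max c1.1 c2.1 ∧
        min c1.2 c2.2 ≤ p.2 ∧ p.2 ≤ max c1.2 c2.2 ∧
        (p.1 = min c1.1 c2.1 ∨ p.1 = max c1.1 c2.1 ∨
         p.2 = min c1.2 c2.2 ∨ p.2 = max c1.2 c2.2)) := by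
  simp [is_rectangle_inside_polygon_alt, List.all_eq_true]
  constructor <;> intro h a b hab <;> have := h a b hab <;> omega

-- membership in A's perimeter list = on-boundary minus the point A's off-by-one skips
set_option maxHeartbeats 1000000 in
lemma mem_perim (corner_1 corner_2 : Int × Int) (p : Int × Int) :
    p ∈ get_rectangle_perimeter_points corner_1 corner_2 ↔
      ((min corner_1.1 corner_2.1 ≤ p.1 ∧ p.1 ≤ max corner_1.1 corner_2.1 ∧
        min corner_1.2 corner_2.2 ≤ p.2 ∧ p.2 ≤ max corner_1.2 corner_2.2 ∧
        (p.1 = min corner_1.1 corner_2.1 ∨ p.1 = max corner_1.1 corner_2.1 ∨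
         p.2 = min corner_1.2 corner_2.2 ∨ p.2 = max corner_1.2 corner_2.2)) ∧
       ¬ (min corner_1.1 corner_2.1 + 2 ≤ max corner_1.1 corner_2.1 ∧
          min corner_1.2 corner_2.2 + 1 ≤ max corner_1.2 corner_2.2 ∧
          p = (min corner_1.1 corner_2.1 + 1, max corner_1.2 corner_2.2))) := by
  obtain ⟨x, y⟩ := p
  obtain ⟨a1, a2⟩ := corner_1
  obtain ⟨b1, b2⟩ := corner_2
  have e1 : (if a1 < b1 then a1 else b1) = min a1 b1 := by rw [min_def]; split_ifs <;> omega
  have e2 : (if a2 < b2 then a2 else b2) = min a2 b2 := by rw [min_def]; split_ifs <;> omega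
  have e3 : (if a1 > b1 then a1 else b1) = max a1 b1 := by rw [max_def]; split_ifs <;> omega
  have e4 : (if a2 > b2 then a2 else b2) = max a2 b2 := by rw [max_def]; split_ifs <;> omega
  simp only [get_rectangle_perimeter_points, e1, e2, e3, e4]
  have hm1 : min a1 b1 ≤ max a1 b1 := by omega
  have hm2 : min a2 b2 ≤ max a2 b2 := by omega
  generalize min a1 b1 = l1 at *
  generalize max a1 b1 = h1 at *
  generalize min a2 b2 = l2 at *
  generalize max a2 b2 = h2 at *
  split_ifs with hy hx <;>
    simp [PySem.List.mem_pyRange_one, PySem.List.mem_pyRange_neg_one, Prod.ext_iff] <;>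
    omega

-- ===== VERDICT (by name: the statement is the Claim_ definition above) =====
theorem is_rectangle_inside_polygon_spec : Claim_unchanged_is_rectangle_inside_polygon := by
  intro obs c1 c2 _ hD
  simp only [D_is_rectangle_inside_polygon] at hD
  rw [is_rectangle_inside_polygon, Bool.eq_iff_iff, pvLoopA_eq_true_iff, alt_eq_true_iff]
  constructor
  · intro hA q hq hBnd
    by_cases hmiss : min c1.1 c2.1 + 2 ≤ max c1.1 c2.1 ∧ min c1.2 c2.2 + 1 ≤ max c1.2 c2.2 ∧
        q = (min c1.1 c2.1 + 1, max c1.2 c2.2)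
    · -- every boundary obstacle must be the skipped point, which would put us inside D_
      apply hD
      refine ⟨hmiss.1, hmiss.2.1, hmiss.2.2 ▸ hq, ?_⟩
      intro r hr hrMax
      have hrBnd : min c1.1 c2.1 ≤ r.1 ∧ r.1 ≤ max c1.1 c2.1 ∧
          min c1.2 c2.2 ≤ r.2 ∧ r.2 ≤ max c1.2 c2.2 ∧
          (r.1 = min c1.1 c2.1 ∨ r.1 = max c1.1 c2.1 ∨
           r.2 = min c1.2 c2.2 ∨ r.2 = max c1.2 c2.2) := by omega
      by_cases hmr : min c1.1 c2.1 + 2 ≤ max c1.1 c2.1 ∧ min c1.2 c2.2 + 1 ≤ max c1.2 c2.2 ∧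
          r = (min c1.1 c2.1 + 1, max c1.2 c2.2)
      · exact hmr.2.2
      · exact absurd hr (hA r ((mem_perim c1 c2 r).mpr ⟨hrBnd, hmr⟩))
    · exact absurd hq (hA q ((mem_perim c1 c2 q).mpr ⟨hBnd, hmiss⟩))
  · intro hB p hp hpobs
    exact hB p hpobs ((mem_perim c1 c2 p).mp hp).1

theorem is_rectangle_inside_polygon_changed : Claim_changed_is_rectangle_inside_polygon := by
  unfold Claim_changed_is_rectangle_inside_polygon; decide

theorem is_rectangle_inside_polygon_tight : Claim_exact_is_rectangle_inside_polygon := by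
  intro obs c1 c2 _ hD
  simp only [D_is_rectangle_inside_polygon] at hD
  obtain ⟨hw, hh, hmem, hall⟩ := hD
  have hA : is_rectangle_inside_polygon obs c1 c2 = true := by
    rw [is_rectangle_inside_polygon, pvLoopA_eq_true_iff]
    intro p hp hpobs
    have hm := (mem_perim c1 c2 p).mp hp
    refine hm.2 ⟨hw, hh, hall p hpobs ?_⟩
    have := hm.1
    omega
  have hB : is_rectangle_inside_polygon_alt obs c1 c2 = false := by
    rw [← Bool.not_eq_true, alt_eq_true_iff]
    intro h
    refine h _ hmem ?_
    simp
    omega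
  rw [hA, hB]
  simp
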